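-- pv_equiv track=rewrite | github.com/Yassine-Sebri/competitive-programming | Code-Signal/Arcade/avoidObstacles.py | avoidObstacles
-- ===== SOURCE A (Python) =====
-- def avoidObstacles(inputArray):
--     output = 2
--     condition = True
--     while condition:
--         for number in inputArray:
--             if number % output == 0:
--                 break
--         if number % output != 0:
--             condition = False
--             break
--         output += 1
--     return output
-- ===== SOURCE B (Python) =====
-- def avoidObstacles(inputArray):
--     divs = set()
--     for x in inputArray:
--         v = abs(x)
--         i = 1
--         while i * i <= v:
--             if v % i == 0:
--                 divs.add(i)
--                 divs.add(v // i)
--             i += 1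
--     d = 2
--     while d in divs:
--         d += 1
--     return d
-- ===== Notes on version B (the rewrite author's own statement) =====
-- stated objective: alternative
-- what changed: Instead of re-scanning the whole array for a divisible element at each candidate step, B makes one preprocessing pass that collects every divisor of each |obstacle| into a set by trial division up to sqrt, then returns the smallest d >= 2 absent from that set.
import Mathlib
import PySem

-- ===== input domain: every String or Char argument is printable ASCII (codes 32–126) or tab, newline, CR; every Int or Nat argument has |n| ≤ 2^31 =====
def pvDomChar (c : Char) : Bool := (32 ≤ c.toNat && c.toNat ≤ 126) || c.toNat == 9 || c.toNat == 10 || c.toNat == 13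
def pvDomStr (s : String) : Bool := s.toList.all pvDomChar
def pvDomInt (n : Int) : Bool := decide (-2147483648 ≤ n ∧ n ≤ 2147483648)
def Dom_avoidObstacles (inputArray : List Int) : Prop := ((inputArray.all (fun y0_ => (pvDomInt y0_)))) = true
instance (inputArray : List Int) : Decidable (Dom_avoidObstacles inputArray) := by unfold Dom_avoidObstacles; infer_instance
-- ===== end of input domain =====

-- B replaces A's per-candidate scan of the whole array by a one-off trial-division pass
-- collecting every divisor of each |obstacle| into a set, then returns the smallest
-- d ≥ 2 absent from that set (alternative algorithm).


-- fuel bound shared by both search-loop ports: a totality guard only (inside Pre_ both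
-- loops return while fuel is still positive; it plays no algorithmic role)
def pvFuel (xs : List Int) : Nat := (xs.foldl (fun a x => max a x.natAbs) 0) + 1

-- ===== PORT A =====
-- the inner `for number in inputArray: if number % output == 0: break`:
-- returns the final value of `number` (first divisible element, else last element);
-- none = loop variable never bound (empty list, Python NameError afterwards)
def pvForScan (d : Int) : List Int → Option Int
  | [] => none
  | [x] => some x
  | x :: y :: rest =>
      if PySem.Int.mod x d == 0 then some x else pvForScan d (y :: rest)

def pvALoop (xs : List Int) : Nat → Int → Int
  | 0, output => output
  | fuel + 1, output =>
      match pvForScan output xs with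
      | none => output   -- Python raises NameError here (empty list); outside Pre_
      | some n =>
          if PySem.Int.mod n output != 0 then output
          else pvALoop xs fuel (output + 1)

def avoidObstacles (inputArray : List Int) : Int :=
  pvALoop inputArray (pvFuel inputArray) 2

-- ===== PORT B =====
-- `i = 1; while i * i <= v: if v % i == 0: divs.add(i); divs.add(v // i); i += 1`
-- (fuel (= v.toNat + 1) is a totality guard only: the loop exits by its own test first)
def pvDivLoop (v : Int) : Nat → Int → PySem.Set Int → PySem.Set Int
  | 0, _, s => s
  | fuel + 1, i, s =>
      if i * i ≤ v then
        pvDivLoop v fuel (i + 1)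
          (if PySem.Int.mod v i == 0 then
            PySem.Set.add (PySem.Set.add s i) (PySem.Int.floordiv v i)
          else s)
      else s

-- `for x in inputArray: v = abs(x); <inner while>` starting from the empty set
def pvBuild (xs : List Int) : PySem.Set Int :=
  xs.foldl (fun s x => pvDivLoop |x| (|x|.toNat + 1) 1 s) PySem.Set.empty

-- `d = 2; while d in divs: d += 1; return d`
def pvBSearch (divs : PySem.Set Int) : Nat → Int → Int
  | 0, d => d
  | fuel + 1, d =>
      if PySem.Set.contains divs d then pvBSearch divs fuel (d + 1) else d

def avoidObstacles_alt (inputArray : List Int) : Int :=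
  pvBSearch (pvBuild inputArray) (pvFuel inputArray) 2

-- ===== PRECONDITION & SPEC =====
-- A raises NameError on the empty list and loops forever when 0 is an obstacle
-- (0 % d == 0 for every d); both inputs are excluded.
def Pre_avoidObstacles (inputArray : List Int) : Prop :=
  inputArray ≠ [] ∧ ¬ ((0 : Int) ∈ inputArray)
instance (inputArray : List Int) : Decidable (Pre_avoidObstacles inputArray) := by
  unfold Pre_avoidObstacles; infer_instance
def pvWitness_avoidObstacles : List Int := [5, 3, 6, 7, 9]

def Spec_avoidObstacles (inputArray : List Int) (out : Int) : Prop := out = avoidObstacles_alt inputArray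
instance (inputArray : List Int) (out : Int) : Decidable (Spec_avoidObstacles inputArray out) := by unfold Spec_avoidObstacles; infer_instance

-- ===== CLAIM (what is proved, stated in full; the proofs are below) =====
def Claim_equal_avoidObstacles : Prop := ∀ (inputArray : List Int), Dom_avoidObstacles inputArray → Pre_avoidObstacles inputArray → Spec_avoidObstacles inputArray (avoidObstacles inputArray)

-- ===== LEMMAS AND PROOFS =====

-- the inner for-loop of A: on a nonempty list it binds `number`, and the test
-- `number % output != 0` that A performs afterwards is exactly "no element is divisible"
theorem pvForScan_spec (d : Int) (xs : List Int) (h : xs ≠ []) :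
    ∃ n, pvForScan d xs = some n ∧ (PySem.Int.mod n d = 0 ↔ ∃ x ∈ xs, d ∣ x) := by
  induction xs with
  | nil => exact absurd rfl h
  | cons x t ih =>
      cases t with
      | nil =>
          refine ⟨x, rfl, ?_⟩
          simp [PySem.Int.mod_eq_zero_iff_dvd]
      | cons y rest =>
          by_cases hx : PySem.Int.mod x d = 0
          · refine ⟨x, by simp [pvForScan, hx], ?_⟩
            exact iff_of_true hx ⟨x, by simp, (PySem.Int.mod_eq_zero_iff_dvd x d).mp hx⟩
          · obtain ⟨n, hn, hiff⟩ := ih (by simp)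
            refine ⟨n, ?_, ?_⟩
            · simpa [pvForScan, hx] using hn
            · rw [hiff]
              constructor
              · rintro ⟨z, hz, hdz⟩; exact ⟨z, List.mem_cons_of_mem x hz, hdz⟩
              · rintro ⟨z, hz, hdz⟩
                rcases List.mem_cons.mp hz with rfl | hz'
                · exact absurd ((PySem.Int.mod_eq_zero_iff_dvd z d).mpr hdz) hx
                · exact ⟨z, hz', hdz⟩

-- the trial-division loop collects exactly: old elements, small divisors ≥ i, and
-- cofactors v / e of small divisors e ≥ i
theorem pvDivLoop_mem (v : Int) (hv : 0 < v) :
    ∀ (fuel : Nat) (i : Int) (s : PySem.Set Int), 1 ≤ i → v < i + fuel →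
      ∀ d, d ∈ pvDivLoop v fuel i s ↔
        d ∈ s ∨ (i ≤ d ∧ d * d ≤ v ∧ d ∣ v) ∨ (∃ e, i ≤ e ∧ e * e ≤ v ∧ e ∣ v ∧ d = v / e) := by
  intro fuel
  induction fuel with
  | zero =>
      intro i s hi hlt d
      simp only [Nat.cast_zero, add_zero] at hlt
      simp only [pvDivLoop]
      constructor
      · intro h; exact Or.inl h
      · rintro (h | ⟨h1, h2, _⟩ | ⟨e, h1, h2, _, _⟩)
        · exact h
        · linarith [mul_le_mul h1 h1 (by linarith) (by linarith : (0:ℤ) ≤ d),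
            mul_self_nonneg (i - 1)]
        · linarith [mul_le_mul h1 h1 (by linarith) (by linarith : (0:ℤ) ≤ e),
            mul_self_nonneg (i - 1)]
  | succ f ih =>
      intro i s hi hlt d
      by_cases hcond : i * i ≤ v
      · simp only [pvDivLoop, if_pos hcond]
        rw [ih (i + 1) _ (by omega) (by omega) d]
        by_cases hdvd : i ∣ v
        · have hmod : (PySem.Int.mod v i == 0) = true := by
            simp [PySem.Int.mod_eq_zero_iff_dvd, hdvd]
          rw [if_pos hmod]
          rw [PySem.Int.floordiv_eq_ediv_of_pos (by omega)]
          simp only [PySem.Set.mem_add]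
          constructor
          · rintro ((( h | rfl) | rfl) | h | ⟨e, he⟩)
            · exact Or.inl h
            · exact Or.inr (Or.inl ⟨le_refl _, hcond, hdvd⟩)
            · exact Or.inr (Or.inr ⟨i, le_refl _, hcond, hdvd, rfl⟩)
            · exact Or.inr (Or.inl ⟨by omega, h.2.1, h.2.2⟩)
            · exact Or.inr (Or.inr ⟨e, by omega, he.2.1, he.2.2.1, he.2.2.2⟩)
          · rintro (h | ⟨h1, h2, h3⟩ | ⟨e, h1, h2, h3, h4⟩)
            · exact Or.inl (Or.inl (Or.inl h))
            · rcases eq_or_lt_of_le h1 with rfl | hgt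
              · exact Or.inl (Or.inl (Or.inr rfl))
              · exact Or.inr (Or.inl ⟨by omega, h2, h3⟩)
            · rcases eq_or_lt_of_le h1 with rfl | hgt
              · exact Or.inl (Or.inr h4)
              · exact Or.inr (Or.inr ⟨e, by omega, h2, h3, h4⟩)
        · have hmod : (PySem.Int.mod v i == 0) = false := by
            simp [PySem.Int.mod_eq_zero_iff_dvd, hdvd]
          rw [if_neg (by simp [hmod])]
          constructor
          · rintro (h | h | ⟨e, he⟩)
            · exact Or.inl h
            · exact Or.inr (Or.inl ⟨by omega, h.2.1, h.2.2⟩)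
            · exact Or.inr (Or.inr ⟨e, by omega, he.2.1, he.2.2.1, he.2.2.2⟩)
          · rintro (h | ⟨h1, h2, h3⟩ | ⟨e, h1, h2, h3, h4⟩)
            · exact Or.inl h
            · rcases eq_or_lt_of_le h1 with rfl | hgt
              · exact absurd h3 hdvd
              · exact Or.inr (Or.inl ⟨by omega, h2, h3⟩)
            · rcases eq_or_lt_of_le h1 with rfl | hgt
              · exact absurd h3 hdvd
              · exact Or.inr (Or.inr ⟨e, by omega, h2, h3, h4⟩)
      · simp only [pvDivLoop, if_neg hcond]
        constructor
        · intro h; exact Or.inl h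
        · rintro (h | ⟨h1, h2, _⟩ | ⟨e, h1, h2, _, _⟩)
          · exact h
          · nlinarith
          · nlinarith

-- a whole run of the inner loop collects exactly the positive divisors of v
theorem pvDivLoop_run_mem (v : Int) (hv : 0 ≤ v) (s : PySem.Set Int) (d : Int) :
    d ∈ pvDivLoop v (v.toNat + 1) 1 s ↔ d ∈ s ∨ (1 ≤ d ∧ d ∣ v ∧ 0 < v) := by
  rcases eq_or_lt_of_le hv with rfl | hvpos
  · simp [pvDivLoop]
  · rw [pvDivLoop_mem v hvpos (v.toNat + 1) 1 s (le_refl _) (by omega) d]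
    constructor
    · rintro (h | ⟨h1, h2, h3⟩ | ⟨e, h1, h2, h3, rfl⟩)
      · exact Or.inl h
      · exact Or.inr ⟨h1, h3, hvpos⟩
      · refine Or.inr ⟨?_, ?_, hvpos⟩
        · have : e ≤ v := by nlinarith
          have : 1 ≤ v / e := by
            rw [Int.le_ediv_iff_mul_le (by omega)]; omega
          omega
        · obtain ⟨c, hc⟩ := h3
          refine ⟨e, ?_⟩
          rw [hc, Int.mul_ediv_cancel_left _ (by omega), mul_comm]
    · rintro (h | ⟨h1, h2, _⟩)
      · exact Or.inl h
      · by_cases hsmall : d * d ≤ v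
        · exact Or.inr (Or.inl ⟨h1, hsmall, h2⟩)
        · obtain ⟨c, hc⟩ := h2
          have hcpos : 0 < c := by nlinarith
          have hcc : c * c ≤ v := by nlinarith
          refine Or.inr (Or.inr ⟨c, by omega, hcc, ⟨d, by rw [hc, mul_comm]⟩, ?_⟩)
          rw [hc, mul_comm, Int.mul_ediv_cancel_left _ (by omega)]

-- the divisor set built over the whole array: d ∈ divs ↔ d ≥ 1 divides some nonzero |x|
theorem pvBuild_mem (xs : List Int) (d : Int) :
    d ∈ pvBuild xs ↔ ∃ x ∈ xs, 1 ≤ d ∧ d ∣ |x| ∧ 0 < |x| := by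
  unfold pvBuild
  suffices h : ∀ (s : PySem.Set Int),
      d ∈ xs.foldl (fun s x => pvDivLoop |x| (|x|.toNat + 1) 1 s) s ↔
        d ∈ s ∨ ∃ x ∈ xs, 1 ≤ d ∧ d ∣ |x| ∧ 0 < |x| by
    rw [h PySem.Set.empty]
    simp [PySem.Set.empty]
  induction xs with
  | nil => intro s; simp
  | cons x t ih =>
      intro s
      simp only [List.foldl_cons]
      rw [ih, pvDivLoop_run_mem |x| (abs_nonneg x) s d]
      constructor
      · rintro ((h | h) | ⟨z, hz, hd⟩)
        · exact Or.inl h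
        · exact Or.inr ⟨x, by simp, h⟩
        · exact Or.inr ⟨z, List.mem_cons_of_mem x hz, hd⟩
      · rintro (h | ⟨z, hz, hd⟩)
        · exact Or.inl (Or.inl h)
        · rcases List.mem_cons.mp hz with rfl | hz'
          · exact Or.inl (Or.inr hd)
          · exact Or.inr ⟨z, hz', hd⟩

-- B's membership test agrees with A's scan condition on lists without 0
theorem pvBCond_iff (xs : List Int) (h0 : (0 : Int) ∉ xs) (d : Int) (hd : 2 ≤ d) :
    PySem.Set.contains (pvBuild xs) d = true ↔ ∃ x ∈ xs, d ∣ x := by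
  rw [PySem.Set.contains_iff, pvBuild_mem]
  constructor
  · rintro ⟨x, hx, _, hdvd, _⟩
    exact ⟨x, hx, (dvd_abs d x).mp hdvd⟩
  · rintro ⟨x, hx, hdvd⟩
    have hxne : x ≠ 0 := fun h => h0 (h ▸ hx)
    exact ⟨x, hx, by omega, (dvd_abs d x).mpr hdvd, abs_pos.mpr hxne⟩

theorem pvLoops_eq (xs : List Int) (hne : xs ≠ []) (h0 : (0 : Int) ∉ xs) :
    ∀ (fuel : Nat) (d : Int), 2 ≤ d →
      pvALoop xs fuel d = pvBSearch (pvBuild xs) fuel d := by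
  intro fuel
  induction fuel with
  | zero => intro d _; rfl
  | succ f ih =>
      intro d hd
      obtain ⟨n, hn, hiff⟩ := pvForScan_spec d xs hne
      by_cases hc : ∃ x ∈ xs, d ∣ x
      · have hmod : PySem.Int.mod n d = 0 := hiff.mpr hc
        have hb : PySem.Set.contains (pvBuild xs) d = true := (pvBCond_iff xs h0 d hd).mpr hc
        simp only [pvALoop, pvBSearch, hn, hmod, hb, if_true]
        simpa using ih (d + 1) (by omega)
      · have hmod : PySem.Int.mod n d ≠ 0 := fun h => hc (hiff.mp h)
        have hb : ¬ (PySem.Set.contains (pvBuild xs) d = true) :=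
          fun h => hc ((pvBCond_iff xs h0 d hd).mp h)
        simp only [pvALoop, pvBSearch, hn, hb]
        simp [hmod]

-- ===== VERDICT (by name: the statement is the Claim_ definition above) =====
theorem avoidObstacles_spec : Claim_equal_avoidObstacles := by
  intro xs _ hpre
  obtain ⟨hne, h0⟩ := hpre
  unfold Spec_avoidObstacles avoidObstacles avoidObstacles_alt
  exact pvLoops_eq xs hne h0 (pvFuel xs) 2 (by omega)
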